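-- pv_equiv track=rewrite | github.com/Zooll51/Amazinum_camp | Task_with_balls.py | solution
-- ===== SOURCE A (Python) =====
-- def solution(buckets):
--     m = buckets.count('B')  # Підрахунок кількості символів 'B'
--     if m == 0:
--         return 0
--
--     n = len(buckets)
--     r = -1
--     for d in range(2):
--         first = d
--         last = d + 2 * (m - 1)
--         if last >= n:
--             break
--
--         may = sum(1 for i in range(first, last + 1, 2) if buckets[i] == 'B')
--         r = max(r, may)
--
--         for last in range(last + 2, n, 2):
--             may += buckets[last] == 'B'
--             may -= buckets[first] == 'B'
--             first += 2
--             r = max(r, may)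
--
--     return r if r < 0 else (m - r)
-- ===== SOURCE B (Python) =====
-- def solution(buckets):
--     # Prefix-sum re-implementation: per parity class, build cumulative 'B' counts
--     # and evaluate every window of m same-parity slots in O(1) via differences.
--     m = buckets.count('B')
--     if m == 0:
--         return 0
--
--     n = len(buckets)
--     best = -1
--     for d in (0, 1):
--         if d + 2 * (m - 1) >= n:
--             break
--         chunk = [buckets[i] for i in range(d, n, 2)]
--         pref = [0]
--         for c in chunk:
--             pref.append(pref[-1] + (c == 'B'))
--         for s in range(len(chunk) - m + 1):
--             best = max(best, pref[s + m] - pref[s])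
--     return -1 if best < 0 else m - best
-- ===== Notes on version B (the rewrite author's own statement) =====
-- stated objective: alternative
-- what changed: Replaces A's incremental sliding window (add the entering bucket, subtract the leaving one, while tracking first/last pointers) by per-parity prefix-sum tables: each parity class is extracted once, cumulative ball counts are built, and every window of m same-parity slots is scored in O(1) as a difference of two prefix entries.
import Mathlib
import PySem

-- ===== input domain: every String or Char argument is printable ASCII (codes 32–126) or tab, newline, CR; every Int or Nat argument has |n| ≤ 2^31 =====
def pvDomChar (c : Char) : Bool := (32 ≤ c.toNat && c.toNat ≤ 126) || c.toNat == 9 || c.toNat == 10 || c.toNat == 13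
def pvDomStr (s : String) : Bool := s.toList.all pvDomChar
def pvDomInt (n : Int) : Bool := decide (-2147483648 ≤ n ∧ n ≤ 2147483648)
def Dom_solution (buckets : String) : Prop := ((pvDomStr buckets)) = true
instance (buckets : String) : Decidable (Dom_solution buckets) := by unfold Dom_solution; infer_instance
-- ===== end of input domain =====

-- B replaces A's incremental sliding window by per-parity prefix-sum tables (same O(n) cost, different structure).


-- ===== PORT A =====
-- one iteration of A's `for d in range(2)` body (the incremental sliding window over parity class d)
def solInnerA (bs : List Char) (m n d r : Int) : Int :=
  let first := d
  let last := d + 2 * (m - 1)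
  -- may = sum(1 for i in range(first, last + 1, 2) if buckets[i] == 'B')
  let may := (PySem.List.pyRange first (last + 1) 2).foldl
    (fun acc i => acc + (if PySem.List.pyGetD bs i ' ' = 'B' then (1 : Int) else 0)) 0
  -- for last in range(last + 2, n, 2): may += …; may -= …; first += 2; r = max(r, may)
  let st := (PySem.List.pyRange (last + 2) n 2).foldl
    (fun (st : Int × Int × Int) l =>
      let may' := st.1 + (if PySem.List.pyGetD bs l ' ' = 'B' then (1 : Int) else 0)
                       - (if PySem.List.pyGetD bs st.2.1 ' ' = 'B' then (1 : Int) else 0)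
      (may', st.2.1 + 2, max st.2.2 may'))
    (may, first, max r may)
  st.2.2

-- `for d in range(2)` unrolled (two iterations); a failed guard is A's `break`
def solution (buckets : String) : Int :=
  let m : Int := (PySem.Str.count buckets "B" : Int)
  if m = 0 then 0
  else
    let n : Int := PySem.Str.len buckets
    let r : Int := -1
    if n ≤ 0 + 2 * (m - 1) then (if r < 0 then r else m - r)
    else
      let r := solInnerA buckets.toList m n 0 r
      if n ≤ 1 + 2 * (m - 1) then (if r < 0 then r else m - r)
      else
        let r := solInnerA buckets.toList m n 1 r
        if r < 0 then r else m - r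

-- ===== PORT B =====
-- one iteration of B's loop body: extract parity class d, build the prefix-sum
-- table of 'B' counts, score every window of m slots as a difference of two entries
def solInnerB (bs : List Char) (m n d best : Int) : Int :=
  let chunk := (PySem.List.pyRange d n 2).map (fun i => PySem.List.pyGetD bs i ' ')
  let pref := chunk.foldl
    (fun p c => p ++ [PySem.List.pyGetD p (-1) 0 + (if c = 'B' then (1 : Int) else 0)])
    ([0] : List Int)
  (PySem.List.pyRange 0 ((chunk.length : Int) - m + 1) 1).foldl
    (fun b s => max b (PySem.List.pyGetD pref (s + m) 0 - PySem.List.pyGetD pref s 0)) best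

def solution_alt (buckets : String) : Int :=
  let m : Int := (PySem.Str.count buckets "B" : Int)
  if m = 0 then 0
  else
    let n : Int := PySem.Str.len buckets
    let best : Int := -1
    if n ≤ 0 + 2 * (m - 1) then (if best < 0 then -1 else m - best)
    else
      let best := solInnerB buckets.toList m n 0 best
      if n ≤ 1 + 2 * (m - 1) then (if best < 0 then -1 else m - best)
      else
        let best := solInnerB buckets.toList m n 1 best
        if best < 0 then -1 else m - best

-- ===== PRECONDITION & SPEC =====
def Spec_solution (buckets : String) (out : Int) : Prop := out = solution_alt buckets
instance (buckets : String) (out : Int) : Decidable (Spec_solution buckets out) := by unfold Spec_solution; infer_instance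

-- ===== CLAIM (what is proved, stated in full; the proofs are below) =====
def Claim_equal_solution : Prop := ∀ (buckets : String), Dom_solution buckets → Spec_solution buckets (solution buckets)

-- ===== LEMMAS AND PROOFS =====

-- prefix sums of a Nat-indexed Int sequence
def pvS (c : Nat → Int) (k : Nat) : Int := ((List.range k).map c).sum
-- the 0/1 indicator of a 'B' at parity-class-d slot k
def pvC (bs : List Char) (d : Int) (k : Nat) : Int :=
  if PySem.List.pyGetD bs (d + 2 * (k : Int)) ' ' = 'B' then 1 else 0
-- window sum: number of 'B' among the mm parity-d slots starting at slot s
def pvWin (bs : List Char) (d : Int) (mm : Nat) (s : Nat) : Int :=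
  pvS (pvC bs d) (s + mm) - pvS (pvC bs d) s

lemma pvS_succ (c : Nat → Int) (k : Nat) : pvS c (k + 1) = pvS c k + c k := by
  simp [pvS, List.range_succ]

lemma slide_fold (cB : Int → Int) (d : Int) (m : Nat) (W : Nat → Int)
    (hW : ∀ t : Nat, W (t + 1) = W t + cB (d + 2 * ((m : Int) + (t : Int))) - cB (d + 2 * (t : Int))) :
    ∀ (T : Nat) (r : Int),
    List.foldl (fun (st : Int × Int × Int) l =>
        (st.1 + cB l - cB st.2.1, st.2.1 + 2, max st.2.2 (st.1 + cB l - cB st.2.1)))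
      (W 0, d, r)
      ((List.range T).map (fun t : Nat => d + 2 * ((m : Int) + (t : Int))))
    = (W T, d + 2 * (T : Int),
       List.foldl max r ((List.range T).map (fun t => W (t + 1)))) := by
  intro T
  induction T with
  | zero => intro r; simp
  | succ T ih =>
    intro r
    rw [List.range_succ]
    simp only [List.map_append, List.map_cons, List.map_nil, List.foldl_append, List.foldl_cons,
      List.foldl_nil]
    rw [ih r]
    simp only [Prod.mk.injEq]
    rw [← hW T]
    refine ⟨rfl, by push_cast; ring, rfl⟩

lemma foldl_max_shift (W : Nat → Int) (r : Int) (T : Nat) :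
    List.foldl max (max r (W 0)) ((List.range T).map (fun t => W (t + 1)))
    = List.foldl max r ((List.range (T + 1)).map W) := by
  simp [List.range_succ_eq_map, List.map_map, Function.comp_def, Nat.succ_eq_add_one]

lemma innerA_char (bs : List Char) (mm : Nat) (d r : Int) (hm : 1 ≤ mm) :
    solInnerA bs (mm : Int) (bs.length : Int) d r
    = List.foldl max r ((List.range
        ((if d + 2 * ((mm : Int) - 1) + 2 < (bs.length : Int)
          then (((bs.length : Int) - (d + 2 * ((mm : Int) - 1) + 2) + 2 - 1) / 2).toNat
          else 0) + 1)).map (pvWin bs d mm)) := by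
  have two : (0 : Int) < 2 := by omega
  simp only [solInnerA]
  rw [PySem.List.pyRange_of_pos _ _ two, PySem.List.pyRange_of_pos _ _ two]
  -- counts
  have hc1 : (if d < d + 2 * ((mm : Int) - 1) + 1
      then ((d + 2 * ((mm : Int) - 1) + 1 - d + 2 - 1) / 2).toNat else 0) = mm := by
    rw [if_pos (by omega)]; omega
  rw [hc1]
  have hmay : List.foldl (fun acc i => acc + if PySem.List.pyGetD bs i ' ' = 'B' then (1:Int) else 0) 0
      ((List.range mm).map (fun k : Nat => d + 2 * (k : Int))) = pvWin bs d mm 0 := by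
    rw [List.foldl_map, PySem.List.foldl_add,
      show (fun y : Nat => if PySem.List.pyGetD bs (d + 2 * (y : Int)) ' ' = 'B' then (1:Int) else 0)
        = pvC bs d from rfl]
    simp [pvWin, pvS]
  rw [hmay]
  have hmap : (List.range (if d + 2 * ((mm : Int) - 1) + 2 < (bs.length : Int)
        then (((bs.length : Int) - (d + 2 * ((mm : Int) - 1) + 2) + 2 - 1) / 2).toNat else 0)).map
        (fun k : Nat => d + 2 * ((mm : Int) - 1) + 2 + 2 * (k : Int))
      = (List.range (if d + 2 * ((mm : Int) - 1) + 2 < (bs.length : Int)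
        then (((bs.length : Int) - (d + 2 * ((mm : Int) - 1) + 2) + 2 - 1) / 2).toNat else 0)).map
        (fun t : Nat => d + 2 * ((mm : Int) + (t : Int))) := by
    apply List.map_congr_left; intro t _; ring
  rw [hmap]
  have hW : ∀ t : Nat, pvWin bs d mm (t + 1) = pvWin bs d mm t
      + (fun i => if PySem.List.pyGetD bs i ' ' = 'B' then (1:Int) else 0) (d + 2 * ((mm : Int) + (t : Int)))
      - (fun i => if PySem.List.pyGetD bs i ' ' = 'B' then (1:Int) else 0) (d + 2 * (t : Int)) := by
    intro t
    have e1 : t + 1 + mm = (t + mm) + 1 := by omega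
    simp only [pvWin, e1, pvS_succ, pvC]
    have e2 : d + 2 * ((t + mm : Nat) : Int) = d + 2 * ((mm : Int) + (t : Int)) := by push_cast; ring
    rw [e2]; ring
  rw [show (fun (st : Int × Int × Int) l =>
        ((st.1 + if PySem.List.pyGetD bs l ' ' = 'B' then (1:Int) else 0) -
            (if PySem.List.pyGetD bs st.2.1 ' ' = 'B' then (1:Int) else 0),
          st.2.1 + 2,
          max st.2.2
            ((st.1 + if PySem.List.pyGetD bs l ' ' = 'B' then (1:Int) else 0) -
              (if PySem.List.pyGetD bs st.2.1 ' ' = 'B' then (1:Int) else 0))))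
      = (fun (st : Int × Int × Int) l =>
        (st.1 + (fun i => if PySem.List.pyGetD bs i ' ' = 'B' then (1:Int) else 0) l
           - (fun i => if PySem.List.pyGetD bs i ' ' = 'B' then (1:Int) else 0) st.2.1,
          st.2.1 + 2,
          max st.2.2 (st.1 + (fun i => if PySem.List.pyGetD bs i ' ' = 'B' then (1:Int) else 0) l
           - (fun i => if PySem.List.pyGetD bs i ' ' = 'B' then (1:Int) else 0) st.2.1))) from rfl,
    slide_fold _ d mm (pvWin bs d mm) hW]
  exact foldl_max_shift (pvWin bs d mm) r _

lemma scan_fold (g : Char → Int) : ∀ (cs : List Char) (acc : List Int) (t : Int),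
    acc.getLast? = some t →
    cs.foldl (fun p c => p ++ [PySem.List.pyGetD p (-1) 0 + g c]) acc
    = acc ++ (List.range cs.length).map (fun k => t + ((cs.take (k + 1)).map g).sum) := by
  intro cs
  induction cs with
  | nil => intro acc t h; simp
  | cons c cs ih =>
    intro acc t h
    have hne : acc ≠ [] := by rintro rfl; simp at h
    have hlast : PySem.List.pyGetD acc (-1) 0 = t := by
      rw [PySem.List.pyGetD_neg_one acc 0 hne]
      rw [List.getLast?_eq_some_getLast hne] at h
      exact Option.some_injective _ h
    rw [List.foldl_cons, hlast,
      ih (acc ++ [t + g c]) (t + g c) (by simp)]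
    rw [List.append_assoc]
    congr 1
    rw [List.length_cons, List.range_succ_eq_map]
    simp only [List.map_cons, List.map_map, List.singleton_append, Function.comp_def]
    congr 1
    · simp
    · apply List.map_congr_left; intro k _
      simp [List.map_cons, List.sum_cons]
      ring

lemma innerB_char (bs : List Char) (mm : Nat) (d r : Int) (hm : 1 ≤ mm) (hd0 : 0 ≤ d)
    (hd : d + 2 * ((mm : Int) - 1) < (bs.length : Int)) :
    solInnerB bs (mm : Int) (bs.length : Int) d r
    = List.foldl max r ((List.range
        (((((bs.length : Int) - d + 1) / 2).toNat : Int) - (mm : Int) + 1).toNat).map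
        (pvWin bs d mm)) := by
  have two : (0 : Int) < 2 := by omega
  set n : Int := (bs.length : Int) with hn
  set K : Nat := ((n - d + 1) / 2).toNat with hK
  set N : Nat := ((K : Int) - (mm : Int) + 1).toNat with hNdef
  have hmK : mm ≤ K := by omega
  simp only [solInnerB]
  rw [PySem.List.pyRange_of_pos _ _ two]
  have hcK : (if d < n then ((n - d + 2 - 1) / 2).toNat else 0) = K := by
    rw [if_pos (by omega)]; omega
  rw [hcK, List.map_map]
  rw [show ((fun i => PySem.List.pyGetD bs i ' ') ∘ (fun k : Nat => d + 2 * (k : Int)))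
      = (fun k : Nat => PySem.List.pyGetD bs (d + 2 * (k : Int)) ' ') from rfl]
  rw [scan_fold _ _ ([0]) 0 rfl]
  rw [List.length_map, List.length_range]
  have hpref : ([0] : List Int) ++ (List.range K).map
      (fun k => 0 + ((((List.range K).map (fun k : Nat => PySem.List.pyGetD bs (d + 2 * (k : Int)) ' ')).take (k + 1)).map
        (fun c => if c = 'B' then (1:Int) else 0)).sum)
      = (List.range (K + 1)).map (pvS (pvC bs d)) := by
    rw [List.range_succ_eq_map, List.map_cons, List.map_map]
    rw [show pvS (pvC bs d) 0 = 0 from by simp [pvS]]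
    rw [List.singleton_append]
    congr 1
    apply List.map_congr_left; intro k hk
    rw [List.mem_range] at hk
    rw [← List.map_take, List.take_range, Nat.min_eq_left (by omega), List.map_map]
    rw [show ((fun c => if c = 'B' then (1:Int) else 0) ∘ (fun k : Nat => PySem.List.pyGetD bs (d + 2 * (k : Int)) ' '))
        = pvC bs d from rfl]
    simp [pvS]
  rw [hpref]
  rw [PySem.List.pyRange_one, List.foldl_map]
  have hNe : ((K : Int) - (mm : Int) + 1 - 0).toNat = N := by omega
  rw [hNe]
  rw [PySem.List.foldl_congr_mem (List.range N) _
    (fun b (k : Nat) => max b (pvWin bs d mm k)) r ?_]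
  · rw [← List.foldl_map]
  · intro acc k hk
    rw [List.mem_range] at hk
    have hkK : k + mm ≤ K := by omega
    have e1 : (0 : Int) + (k : Int) + (mm : Int) = ((k + mm : Nat) : Int) := by push_cast; ring
    have e2 : (0 : Int) + (k : Int) = ((k : Nat) : Int) := by ring
    rw [e1, e2, PySem.List.pyGetD_natCast, PySem.List.pyGetD_natCast,
      PySem.List.getD_map_range _ _ _ _ (by omega), PySem.List.getD_map_range _ _ _ _ (by omega)]
    rfl

-- the per-parity loop bodies agree
lemma inner_eq (bs : List Char) (mm : Nat) (d r : Int) (hm : 1 ≤ mm) (hd0 : 0 ≤ d)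
    (hd : d + 2 * ((mm : Int) - 1) < (bs.length : Int)) :
    solInnerA bs (mm : Int) (bs.length : Int) d r = solInnerB bs (mm : Int) (bs.length : Int) d r := by
  rw [innerA_char bs mm d r hm, innerB_char bs mm d r hm hd0 hd]
  congr 3
  split_ifs with h <;> omega

-- A's loop body never decreases r
lemma inner_ge (bs : List Char) (mm : Nat) (d r : Int) (hm : 1 ≤ mm) :
    r ≤ solInnerA bs (mm : Int) (bs.length : Int) d r := by
  rw [innerA_char bs mm d r hm]
  exact (PySem.List.le_foldl_max _ _).1

-- ===== VERDICT (by name: the statement is the Claim_ definition above) =====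
theorem solution_spec : Claim_equal_solution := by
  intro buckets _
  unfold Spec_solution solution solution_alt
  simp only [PySem.Str.len_eq]
  set bs : List Char := buckets.toList with hbs
  set cnt : Nat := PySem.Str.count buckets "B" with hcnt
  by_cases h0 : ((cnt : Int) = 0)
  · rw [if_pos h0, if_pos h0]
  · rw [if_neg h0, if_neg h0]
    have hm : 1 ≤ cnt := by omega
    by_cases g0 : (bs.length : Int) ≤ 0 + 2 * ((cnt : Int) - 1)
    · rw [if_pos g0, if_pos g0]
    · rw [if_neg g0, if_neg g0]
      have hg0 : (0 : Int) + 2 * ((cnt : Int) - 1) < (bs.length : Int) := by omega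
      have e0 := inner_eq bs cnt 0 (-1) hm (by omega) hg0
      have ge0 := inner_ge bs cnt 0 (-1) hm
      by_cases g1 : (bs.length : Int) ≤ 1 + 2 * ((cnt : Int) - 1)
      · rw [if_pos g1, if_pos g1, ← e0]
        split_ifs with hr
        · omega
        · rfl
      · rw [if_neg g1, if_neg g1, ← e0]
        have hg1 : (1 : Int) + 2 * ((cnt : Int) - 1) < (bs.length : Int) := by omega
        have e1 := inner_eq bs cnt 1 (solInnerA bs (cnt : Int) (bs.length : Int) 0 (-1)) hm (by omega) hg1
        have ge1 := inner_ge bs cnt 1 (solInnerA bs (cnt : Int) (bs.length : Int) 0 (-1)) hm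
        rw [← e1]
        split_ifs with hr
        · omega
        · rfl
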